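-- pv_equiv track=rewrite | github.com/FelixFalling/problem-solving-search | problem_solving_as_search.py | _min_removals_for_line
-- ===== SOURCE A (Python) =====
-- def _min_removals_for_line(tiles):
--     n = len(tiles)
--     adj = [[] for _ in range(n)]
--     for i in range(n):
--         for j in range(i + 1, n):
--             ci, gi = tiles[i]
--             cj, gj = tiles[j]
--             if (ci < cj) != (gi < gj):
--                 adj[i].append(j)
--                 adj[j].append(i)
--     removed = [False] * n
--     count = 0
--     while True:
--         best, best_idx = 0, -1
--         for i in range(n):
--             if not removed[i]:
--                 c = sum(1 for j in adj[i] if not removed[j])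
--                 if c > best:
--                     best, best_idx = c, i
--         if best == 0:
--             break
--         removed[best_idx] = True
--         count += 1
--     return count
-- ===== SOURCE B (Python) =====
-- def _min_removals_for_line(tiles):
--     alive = list(tiles)
--     count = 0
--     while True:
--         m = len(alive)
--         deg = [0] * m
--         for i in range(m):
--             ci, gi = alive[i]
--             for j in range(i + 1, m):
--                 cj, gj = alive[j]
--                 if (ci < cj) != (gi < gj):
--                     deg[i] += 1
--                     deg[j] += 1
--         best, best_idx = 0, -1
--         for k in range(m):
--             if deg[k] > best:
--                 best, best_idx = deg[k], k
--         if best == 0: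
--             return count
--         del alive[best_idx]
--         count += 1
-- ===== Notes on version B (the rewrite author's own statement) =====
-- stated objective: alternative
-- what changed: B never materialises the conflict graph or a removed-mask: it keeps a physically shrinking list of the surviving tiles, tallies every tile's conflict count afresh each round in one pass over the unordered pairs of survivors (orienting each comparison by list position, which deletion preserves), and deletes the chosen tile from the list; A instead builds adjacency lists once up front and greedily flags vertices in a boolean mask while rescanning each live vertex's adjacency row against the mask every round.
import Mathlib
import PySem

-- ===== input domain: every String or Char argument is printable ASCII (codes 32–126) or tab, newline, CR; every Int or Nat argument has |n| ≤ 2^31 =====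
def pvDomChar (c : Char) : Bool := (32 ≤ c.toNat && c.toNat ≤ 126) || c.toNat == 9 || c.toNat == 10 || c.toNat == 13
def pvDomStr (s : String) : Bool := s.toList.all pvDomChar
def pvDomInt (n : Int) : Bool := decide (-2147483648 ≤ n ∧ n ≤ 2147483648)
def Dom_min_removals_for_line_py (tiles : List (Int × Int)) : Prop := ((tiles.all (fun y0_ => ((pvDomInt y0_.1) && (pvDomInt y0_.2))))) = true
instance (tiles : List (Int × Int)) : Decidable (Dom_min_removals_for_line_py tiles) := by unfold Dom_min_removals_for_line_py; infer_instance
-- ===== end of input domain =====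

-- B never builds the conflict graph or a removed-mask: it keeps a shrinking list of the
-- surviving tiles, tallies every tile's conflict count afresh each round in one pass over
-- the unordered pairs of survivors, and deletes the chosen tile from the list
-- (alternative structure; the worst-case cost is the same).

-- ===== PORT A =====
-- conflict test '(ci < cj) != (gi < gj)' (shared by both ports)
def pvCond (a b : Int × Int) : Bool := (decide (a.1 < b.1)) != (decide (a.2 < b.2))

-- 'adj[i].append(j); adj[j].append(i)' guarded by the conflict test
def pvStepPair (tiles : List (Int × Int)) (adj : List (List Nat)) (i j : Nat) : List (List Nat) :=
  if pvCond (tiles.getD i (0, 0)) (tiles.getD j (0, 0)) then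
    (adj.modify i (· ++ [j])).modify j (· ++ [i])
  else adj

-- A's build: for i in range(n): for j in range(i+1, n): …
def pvBuildA (tiles : List (Int × Int)) : List (List Nat) :=
  (List.range tiles.length).foldl
    (fun adj i =>
      (List.range' (i + 1) (tiles.length - (i + 1))).foldl
        (fun adj j => pvStepPair tiles adj i j) adj)
    (List.replicate tiles.length [])

-- 'sum(1 for j in adj[i] if not removed[j])'
def pvAliveCnt (adj : List (List Nat)) (removed : List Bool) (i : Nat) : Int :=
  ((adj.getD i []).countP (fun j => !(removed.getD j true)) : Int)

-- A's selection scan: best, best_idx = 0, -1; for i in range(n): …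
def pvSelectA (adj : List (List Nat)) (removed : List Bool) (n : Nat) : Int × Int :=
  (List.range n).foldl
    (fun b i =>
      if !(removed.getD i true) then
        if pvAliveCnt adj removed i > b.1 then (pvAliveCnt adj removed i, (i : Int)) else b
      else b)
    (0, -1)

-- A's 'while True' loop; fuel n+1 suffices (each pass removes a vertex or returns)
def pvLoopA (adj : List (List Nat)) (n : Nat) : Nat → List Bool → Int → Int
  | 0, _, count => count
  | fuel + 1, removed, count =>
    let bb := pvSelectA adj removed n
    if bb.1 = 0 then count
    else pvLoopA adj n fuel (removed.set bb.2.toNat true) (count + 1)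

def min_removals_for_line_py (tiles : List (Int × Int)) : Int :=
  pvLoopA (pvBuildA tiles) tiles.length (tiles.length + 1)
    (List.replicate tiles.length false) 0

-- ===== PORT B =====
-- 'if (ci < cj) != (gi < gj): deg[i] += 1; deg[j] += 1' for one pair of survivors
def pvDegStep (alive : List (Int × Int)) (deg : List Int) (i j : Nat) : List Int :=
  if pvCond (alive.getD i (0, 0)) (alive.getD j (0, 0)) then
    (deg.modify i (· + 1)).modify j (· + 1)
  else deg

-- B's per-round degree tally: for i in range(m): for j in range(i+1, m): …
def pvDegArr (alive : List (Int × Int)) : List Int :=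
  (List.range alive.length).foldl
    (fun deg i =>
      (List.range' (i + 1) (alive.length - (i + 1))).foldl
        (fun deg j => pvDegStep alive deg i j) deg)
    (List.replicate alive.length 0)

-- B's selection scan over the tallied degrees
def pvSelectB (deg : List Int) (m : Nat) : Int × Int :=
  (List.range m).foldl
    (fun b k => if deg.getD k 0 > b.1 then (deg.getD k 0, (k : Int)) else b) (0, -1)

-- B's 'while True' loop: 'del alive[best_idx]'; fuel n+1 suffices (the list shrinks or we return)
def pvGoB : Nat → List (Int × Int) → Int → Int
  | 0, _, count => count
  | fuel + 1, alive, count =>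
    let bb := pvSelectB (pvDegArr alive) alive.length
    if bb.1 = 0 then count
    else pvGoB fuel (alive.eraseIdx bb.2.toNat) (count + 1)

def min_removals_for_line_py_alt (tiles : List (Int × Int)) : Int :=
  pvGoB (tiles.length + 1) tiles 0

-- ===== PRECONDITION & SPEC =====
def Spec_min_removals_for_line_py (tiles : List (Int × Int)) (out : Int) : Prop := out = min_removals_for_line_py_alt tiles
instance (tiles : List (Int × Int)) (out : Int) : Decidable (Spec_min_removals_for_line_py tiles out) := by unfold Spec_min_removals_for_line_py; infer_instance

-- ===== CLAIM (what is proved, stated in full; the proofs are below) =====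
def Claim_equal_min_removals_for_line_py : Prop := ∀ (tiles : List (Int × Int)), Dom_min_removals_for_line_py tiles → Spec_min_removals_for_line_py tiles (min_removals_for_line_py tiles)

-- ===== LEMMAS AND PROOFS =====

-- liveness of an original index under A's mask, and the list of live indices in order
def pvLive (removed : List Bool) (i : Nat) : Bool := !(removed.getD i true)
def pvK (removed : List Bool) (n : Nat) : List Nat := (List.range n).filter (pvLive removed)
def pvF (tiles : List (Int × Int)) (i : Nat) : Int × Int := tiles.getD i (0, 0)

-- the oriented conflict test between original indices v and u
def pvOri (tiles : List (Int × Int)) (v u : Nat) : Bool :=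
  if u < v then pvCond (pvF tiles u) (pvF tiles v)
  else if v < u then pvCond (pvF tiles v) (pvF tiles u) else false

-- ---- A-side: the built adjacency row is the canonical conflict row ----

def pvPartner (tiles : List (Int × Int)) (v : Nat) (p : Nat × Nat) : Option Nat :=
  if pvCond (tiles.getD p.1 (0, 0)) (tiles.getD p.2 (0, 0)) then
    (if v = p.1 then some p.2 else if v = p.2 then some p.1 else none)
  else none

def pvPairFold (tiles : List (Int × Int)) (ps : List (Nat × Nat)) (adj : List (List Nat)) : List (List Nat) :=
  ps.foldl (fun a p => pvStepPair tiles a p.1 p.2) adj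

def pvPairsA (n : Nat) : List (Nat × Nat) :=
  (List.range n).flatMap (fun i => (List.range' (i + 1) (n - (i + 1))).map (fun j => (i, j)))

-- closed form of a finished adjacency row v (v < n): smaller conflicting partners, then larger
def pvCanon (tiles : List (Int × Int)) (n v : Nat) : List Nat :=
  (List.range v).filter (fun k => pvCond (tiles.getD k (0, 0)) (tiles.getD v (0, 0))) ++
  (List.range' (v + 1) (n - (v + 1))).filter (fun j => pvCond (tiles.getD v (0, 0)) (tiles.getD j (0, 0)))

theorem pvStepPair_length (tiles : List (Int × Int)) (adj : List (List Nat)) (i j : Nat) :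
    (pvStepPair tiles adj i j).length = adj.length := by
  unfold pvStepPair; split <;> simp

theorem pvStepPair_getD (tiles : List (Int × Int)) (adj : List (List Nat)) (i j v : Nat)
    (hi : i < adj.length) (hj : j < adj.length) (hij : i ≠ j) :
    (pvStepPair tiles adj i j).getD v [] =
      adj.getD v [] ++ (pvPartner tiles v (i, j)).toList := by
  by_cases hc : pvCond (tiles.getD i (0, 0)) (tiles.getD j (0, 0)) = true
  · simp only [pvStepPair, pvPartner, hc, if_true]
    have hai : adj[i]? = some adj[i] := List.getElem?_eq_getElem hi
    have haj : adj[j]? = some adj[j] := List.getElem?_eq_getElem hj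
    rcases eq_or_ne v i with rfl | hvi
    · simp [List.getD_eq_getElem?_getD, List.getElem?_modify, hij, Ne.symm hij, hai,
        List.getD_eq_getElem _ _ hi]
    · rcases eq_or_ne v j with rfl | hvj
      · simp [List.getD_eq_getElem?_getD, List.getElem?_modify, hij, Ne.symm hij, Ne.symm hvi, haj,
          List.getD_eq_getElem _ _ hj]
      · have h1 : i ≠ v := Ne.symm hvi
        have h2 : j ≠ v := Ne.symm hvj
        simp [List.getD_eq_getElem?_getD, List.getElem?_modify, h1, h2, hvi, hvj]
  · unfold pvStepPair pvPartner
    rw [if_neg hc]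
    simp only [if_neg hc]
    simp

theorem pvPairFold_getD (tiles : List (Int × Int)) (ps : List (Nat × Nat)) (adj : List (List Nat)) (v : Nat)
    (h : ∀ p ∈ ps, p.1 < adj.length ∧ p.2 < adj.length ∧ p.1 ≠ p.2) :
    (pvPairFold tiles ps adj).getD v [] =
      adj.getD v [] ++ ps.filterMap (pvPartner tiles v) := by
  induction ps generalizing adj with
  | nil => simp [pvPairFold]
  | cons p t ih =>
    have hp := h p (List.mem_cons_self)
    have hrest : ∀ q ∈ t, q.1 < (pvStepPair tiles adj p.1 p.2).length ∧
        q.2 < (pvStepPair tiles adj p.1 p.2).length ∧ q.1 ≠ q.2 := by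
      intro q hq
      simpa [pvStepPair_length] using h q (List.mem_cons_of_mem _ hq)
    have hstep : (pvPairFold tiles (p :: t) adj) = pvPairFold tiles t (pvStepPair tiles adj p.1 p.2) := rfl
    rw [hstep, ih _ hrest, pvStepPair_getD tiles adj p.1 p.2 v hp.1 hp.2.1 hp.2.2]
    cases hpp : pvPartner tiles v p <;>
      simp [List.filterMap_cons, hpp]

theorem pvBuildA_eq (tiles : List (Int × Int)) :
    pvBuildA tiles = pvPairFold tiles (pvPairsA tiles.length) (List.replicate tiles.length []) := by
  simp [pvBuildA, pvPairFold, pvPairsA, List.foldl_flatMap, List.foldl_map]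

theorem pvFilterMap_single {l : List Nat} (hnd : l.Nodup) (v : Nat) (r : Option Nat) :
    l.filterMap (fun x => if x = v then r else none) = if v ∈ l then r.toList else [] := by
  induction l with
  | nil => simp
  | cons a t ih =>
    rw [List.nodup_cons] at hnd
    by_cases h : a = v
    · subst h
      have hnot : a ∉ t := hnd.1
      cases r with
      | none => simp [List.filterMap_cons, ih hnd.2, hnot]
      | some b => simp [List.filterMap_cons, ih hnd.2, hnot]
    · rw [List.filterMap_cons]
      simp only [if_neg h]
      rw [ih hnd.2]
      simp [List.mem_cons, Ne.symm h, h]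

theorem pvFlatMap_if_singleton (l : List Nat) (p : Nat → Bool) :
    l.flatMap (fun x => if p x then [x] else []) = l.filter p := by
  induction l with
  | nil => rfl
  | cons a t ih => by_cases h : p a <;> simp [List.flatMap_cons, h, ih]

theorem pvFilterMap_flatMap {α β γ : Type} (l : List α) (g : α → List β) (f : β → Option γ) :
    (l.flatMap g).filterMap f = l.flatMap (fun x => (g x).filterMap f) := by
  induction l with
  | nil => rfl
  | cons a t ih => simp [List.flatMap_cons, List.filterMap_append, ih]

theorem pvFlatMap_congr {α β : Type} {l : List α} {f g : α → List β} (h : ∀ x ∈ l, f x = g x) :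
    l.flatMap f = l.flatMap g := by
  induction l with
  | nil => rfl
  | cons a t ih => simp [List.flatMap_cons, h a (by simp), ih (fun x hx => h x (by simp [hx]))]

theorem pvFilterMap_guard (l : List Nat) (p : Nat → Bool) :
    l.filterMap (fun x => if p x then some x else none) = l.filter p := by
  induction l with
  | nil => rfl
  | cons a t ih => by_cases h : p a <;> simp [List.filterMap_cons, h, ih]

theorem pvRange_split (n v : Nat) (hv : v < n) :
    List.range n = List.range v ++ v :: List.range' (v + 1) (n - (v + 1)) := by
  rw [List.range_eq_range']
  conv_lhs => rw [show n = v + (n - v) by omega]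
  rw [← List.range'_append]
  simp
  rw [show n - v = (n - (v + 1)) + 1 by omega, List.range'_succ]
  simp [List.range_eq_range']

theorem pvFilterMapA (tiles : List (Int × Int)) (n v : Nat) (hv : v < n) :
    (pvPairsA n).filterMap (pvPartner tiles v) = pvCanon tiles n v := by
  unfold pvPairsA
  rw [pvFilterMap_flatMap]
  have hinner : ∀ i : Nat,
      ((List.range' (i + 1) (n - (i + 1))).map (fun j => (i, j))).filterMap (pvPartner tiles v)
        = (List.range' (i + 1) (n - (i + 1))).filterMap (fun j => pvPartner tiles v (i, j)) := by
    intro i; rw [List.filterMap_map]; rfl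
  rw [pvRange_split n v hv, List.flatMap_append, List.flatMap_cons]
  have h1 : (List.range v).flatMap (fun i =>
        ((List.range' (i + 1) (n - (i + 1))).map (fun j => (i, j))).filterMap (pvPartner tiles v))
      = (List.range v).filter (fun k => pvCond (tiles.getD k (0, 0)) (tiles.getD v (0, 0))) := by
    rw [← pvFlatMap_if_singleton (List.range v) (fun k => pvCond (tiles.getD k (0, 0)) (tiles.getD v (0, 0)))]
    apply pvFlatMap_congr
    intro i hi
    have hiv : i < v := List.mem_range.mp hi
    rw [hinner i]
    have hcg : ∀ j ∈ List.range' (i + 1) (n - (i + 1)), pvPartner tiles v (i, j)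
        = (fun j => if j = v then (if pvCond (tiles.getD i (0, 0)) (tiles.getD v (0, 0)) then some i else none) else none) j := by
      intro j hj
      have hj' := List.mem_range'_1.mp hj
      have hvi : v ≠ i := by omega
      by_cases hjv : j = v
      · subst hjv; simp [pvPartner, hvi]
      · have : v ≠ j := fun hh => hjv hh.symm
        simp [pvPartner, hvi, this, hjv]
    rw [List.filterMap_congr hcg,
      pvFilterMap_single (List.nodup_range' 1 (by norm_num)) v _]
    have hvmem : v ∈ List.range' (i + 1) (n - (i + 1)) := List.mem_range'_1.mpr ⟨by omega, by omega⟩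
    rw [if_pos hvmem]
    split <;> rfl
  have h2 : ((List.range' (v + 1) (n - (v + 1))).map (fun j => (v, j))).filterMap (pvPartner tiles v)
      = (List.range' (v + 1) (n - (v + 1))).filter (fun j => pvCond (tiles.getD v (0, 0)) (tiles.getD j (0, 0))) := by
    rw [hinner v, ← pvFilterMap_guard]
    apply List.filterMap_congr
    intro j _
    simp [pvPartner]
  have h3 : (List.range' (v + 1) (n - (v + 1))).flatMap (fun i =>
        ((List.range' (i + 1) (n - (i + 1))).map (fun j => (i, j))).filterMap (pvPartner tiles v))
      = (List.range' (v + 1) (n - (v + 1))).flatMap (fun _ => ([] : List Nat)) := by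
    apply pvFlatMap_congr
    intro i hi
    have hvi : v < i := by have := List.mem_range'_1.mp hi; omega
    rw [hinner i]
    have hcg : ∀ j ∈ List.range' (i + 1) (n - (i + 1)), pvPartner tiles v (i, j) = none := by
      intro j hj
      have hj' := List.mem_range'_1.mp hj
      have h1' : v ≠ i := by omega
      have h2' : v ≠ j := by omega
      simp [pvPartner, h1', h2']
    rw [List.filterMap_congr hcg]
    simp
  rw [h1, h2, h3]
  simp [pvCanon]

theorem pvPairsA_bound (n : Nat) : ∀ p ∈ pvPairsA n, p.1 < n ∧ p.2 < n ∧ p.1 ≠ p.2 := by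
  intro p hp
  simp only [pvPairsA, List.mem_flatMap, List.mem_map, List.mem_range, List.mem_range'] at hp
  obtain ⟨i, hi, j, hj, rfl⟩ := hp
  obtain ⟨k, hk, rfl⟩ := hj
  refine ⟨hi, by omega, by omega⟩

theorem pvBuildA_getD (tiles : List (Int × Int)) (v : Nat) (hv : v < tiles.length) :
    (pvBuildA tiles).getD v [] = pvCanon tiles tiles.length v := by
  rw [pvBuildA_eq, pvPairFold_getD _ _ _ _ (by simpa using pvPairsA_bound tiles.length),
    pvFilterMapA tiles tiles.length v hv]
  simp [List.getD_eq_getElem?_getD, List.getElem?_replicate, hv]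

-- ---- B-side: the tallied degree of position k is the length of its canonical row ----

def pvDegFold (alive : List (Int × Int)) (ps : List (Nat × Nat)) (deg : List Int) : List Int :=
  ps.foldl (fun d p => pvDegStep alive d p.1 p.2) deg

theorem pvDegStep_length (alive : List (Int × Int)) (deg : List Int) (i j : Nat) :
    (pvDegStep alive deg i j).length = deg.length := by
  unfold pvDegStep; split <;> simp

theorem pvDegStep_getD (alive : List (Int × Int)) (deg : List Int) (i j v : Nat)
    (hi : i < deg.length) (hj : j < deg.length) (hij : i ≠ j) :
    (pvDegStep alive deg i j).getD v 0 =
      deg.getD v 0 + ((pvPartner alive v (i, j)).toList.length : Int) := by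
  by_cases hc : pvCond (alive.getD i (0, 0)) (alive.getD j (0, 0)) = true
  · simp only [pvDegStep, pvPartner, hc, if_true]
    have hdi : deg[i]? = some deg[i] := List.getElem?_eq_getElem hi
    have hdj : deg[j]? = some deg[j] := List.getElem?_eq_getElem hj
    rcases eq_or_ne v i with rfl | hvi
    · simp [List.getD_eq_getElem?_getD, List.getElem?_modify, Ne.symm hij, hdi,
        List.getD_eq_getElem _ _ hi]
    · rcases eq_or_ne v j with rfl | hvj
      · simp [List.getD_eq_getElem?_getD, List.getElem?_modify, hij, hvi, Ne.symm hvi, hdj,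
          List.getD_eq_getElem _ _ hj]
      · have h1 : i ≠ v := Ne.symm hvi
        have h2 : j ≠ v := Ne.symm hvj
        simp [List.getD_eq_getElem?_getD, List.getElem?_modify, h1, h2, hvi, hvj]
  · unfold pvDegStep pvPartner
    rw [if_neg hc]
    simp only [if_neg hc]
    simp

theorem pvDegFold_getD (alive : List (Int × Int)) (ps : List (Nat × Nat)) (deg : List Int) (v : Nat)
    (h : ∀ p ∈ ps, p.1 < deg.length ∧ p.2 < deg.length ∧ p.1 ≠ p.2) :
    (pvDegFold alive ps deg).getD v 0 =
      deg.getD v 0 + ((ps.filterMap (pvPartner alive v)).length : Int) := by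
  induction ps generalizing deg with
  | nil => simp [pvDegFold]
  | cons p t ih =>
    have hp := h p (List.mem_cons_self)
    have hrest : ∀ q ∈ t, q.1 < (pvDegStep alive deg p.1 p.2).length ∧
        q.2 < (pvDegStep alive deg p.1 p.2).length ∧ q.1 ≠ q.2 := by
      intro q hq
      simpa [pvDegStep_length] using h q (List.mem_cons_of_mem _ hq)
    have hstep : (pvDegFold alive (p :: t) deg) = pvDegFold alive t (pvDegStep alive deg p.1 p.2) := rfl
    rw [hstep, ih _ hrest, pvDegStep_getD alive deg p.1 p.2 v hp.1 hp.2.1 hp.2.2]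
    cases hpp : pvPartner alive v p <;>
      simp [List.filterMap_cons, hpp] <;> ring

theorem pvDegArr_eq (alive : List (Int × Int)) :
    pvDegArr alive = pvDegFold alive (pvPairsA alive.length) (List.replicate alive.length 0) := by
  simp [pvDegArr, pvDegFold, pvPairsA, List.foldl_flatMap, List.foldl_map]

theorem pvDegArr_getD (alive : List (Int × Int)) (k : Nat) (hk : k < alive.length) :
    (pvDegArr alive).getD k 0 = ((pvCanon alive alive.length k).length : Int) := by
  rw [pvDegArr_eq, pvDegFold_getD _ _ _ _ (by simpa using pvPairsA_bound alive.length),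
    pvFilterMapA alive alive.length k hk]
  simp [List.getD_eq_getElem?_getD, List.getElem?_replicate, hk]

theorem pvCanon_length (alive : List (Int × Int)) (k : Nat) (hk : k < alive.length) :
    (pvCanon alive alive.length k).length
      = (List.range alive.length).countP
          (fun l => if l < k then pvCond (alive.getD l (0, 0)) (alive.getD k (0, 0))
                    else if k < l then pvCond (alive.getD k (0, 0)) (alive.getD l (0, 0))
                    else false) := by
  rw [pvRange_split alive.length k hk, List.countP_append, List.countP_cons]
  unfold pvCanon
  rw [List.length_append, ← List.countP_eq_length_filter, ← List.countP_eq_length_filter]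
  have e1 : (List.range k).countP
        (fun l => if l < k then pvCond (alive.getD l (0, 0)) (alive.getD k (0, 0))
                  else if k < l then pvCond (alive.getD k (0, 0)) (alive.getD l (0, 0))
                  else false)
      = (List.range k).countP (fun l => pvCond (alive.getD l (0, 0)) (alive.getD k (0, 0))) := by
    apply List.countP_congr
    intro l hl
    have : l < k := List.mem_range.mp hl
    simp [this]
  have e2 : (List.range' (k + 1) (alive.length - (k + 1))).countP
        (fun l => if l < k then pvCond (alive.getD l (0, 0)) (alive.getD k (0, 0))
                  else if k < l then pvCond (alive.getD k (0, 0)) (alive.getD l (0, 0))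
                  else false)
      = (List.range' (k + 1) (alive.length - (k + 1))).countP
          (fun l => pvCond (alive.getD k (0, 0)) (alive.getD l (0, 0))) := by
    apply List.countP_congr
    intro l hl
    have hkl : k < l := by have := List.mem_range'_1.mp hl; omega
    have : ¬ l < k := by omega
    simp [this, hkl]
  rw [e1, e2]
  simp

-- ---- generic list facts ----

theorem pvMapGetD {α : Type} (l : List α) (d : α) :
    (List.range l.length).map (fun i => l.getD i d) = l := by
  apply List.ext_getElem
  · simp
  · intro i h1 h2
    simp [List.getElem?_eq_getElem h2]

theorem pvFoldl_rel {α β γ : Type} (R : β → γ → Prop) (f : β → α → β) (g : γ → α → γ) :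
    ∀ (l : List α) (i1 : β) (i2 : γ), R i1 i2 →
      (∀ b c x, x ∈ l → R b c → R (f b x) (g c x)) →
      R (l.foldl f i1) (l.foldl g i2) := by
  intro l
  induction l with
  | nil => intro i1 i2 h0 _; exact h0
  | cons a t ih =>
    intro i1 i2 h0 hs
    exact ih (f i1 a) (g i2 a) (hs i1 i2 a (by simp) h0)
      (fun b c x hx => hs b c x (by simp [hx]))

theorem pvSorted_lt_iff {K : List Nat} (h : K.Pairwise (· < ·)) {k l : Nat}
    (hk : k < K.length) (hl : l < K.length) : K[l] < K[k] ↔ l < k := by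
  constructor
  · intro hlt
    by_contra hnk
    rcases Nat.lt_or_ge k l with hkl | hkl
    · have := List.pairwise_iff_getElem.mp h k l hk hl hkl
      omega
    · have : k = l := by omega
      subst this; omega
  · intro hlk
    exact List.pairwise_iff_getElem.mp h l k hl hk hlk

-- ---- the live-index list pvK ----

theorem pvK_pairwise (removed : List Bool) (n : Nat) : (pvK removed n).Pairwise (· < ·) :=
  List.Pairwise.filter _ List.pairwise_lt_range

theorem pvK_mem {removed : List Bool} {n u : Nat} (h : u ∈ pvK removed n) :
    u < n ∧ pvLive removed u = true := by
  have := List.mem_filter.mp h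
  exact ⟨List.mem_range.mp this.1, this.2⟩

theorem pvK_getD_getElem (removed : List Bool) (n k : Nat) (hk : k < (pvK removed n).length) :
    (pvK removed n).getD k 0 = (pvK removed n)[k] :=
  List.getD_eq_getElem _ _ hk

theorem pvK_countP (removed : List Bool) (n : Nat) (p : Nat → Bool) :
    (pvK removed n).countP p = (List.range n).countP (fun u => p u && pvLive removed u) := by
  unfold pvK
  rw [List.countP_filter]

-- ---- degree equality: A's live-neighbour recount = B's on-the-fly count ----

theorem pvAliveCnt_ori (tiles : List (Int × Int)) (removed : List Bool) (v : Nat)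
    (hv : v < tiles.length) :
    pvAliveCnt (pvBuildA tiles) removed v
      = (((List.range tiles.length).countP (fun u => pvOri tiles v u && pvLive removed u) : Nat) : Int) := by
  unfold pvAliveCnt
  rw [pvBuildA_getD tiles v hv]
  congr 1
  rw [pvRange_split tiles.length v hv, List.countP_append, List.countP_cons]
  have hvm : (pvOri tiles v v && pvLive removed v) = false := by simp [pvOri]
  rw [hvm]
  unfold pvCanon
  rw [List.countP_append, List.countP_filter, List.countP_filter]
  have e1 : (List.range v).countP
        (fun u => (fun j => !(removed.getD j true)) u && pvCond (tiles.getD u (0, 0)) (tiles.getD v (0, 0)))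
      = (List.range v).countP (fun u => pvOri tiles v u && pvLive removed u) := by
    apply List.countP_congr
    intro u hu
    have huv : u < v := List.mem_range.mp hu
    simp [pvOri, pvF, pvLive, huv, Bool.and_comm]
  have e2 : (List.range' (v + 1) (tiles.length - (v + 1))).countP
        (fun u => (fun j => !(removed.getD j true)) u && pvCond (tiles.getD v (0, 0)) (tiles.getD u (0, 0)))
      = (List.range' (v + 1) (tiles.length - (v + 1))).countP (fun u => pvOri tiles v u && pvLive removed u) := by
    apply List.countP_congr
    intro u hu
    have huv : v < u := by have := List.mem_range'_1.mp hu; omega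
    have hnuv : ¬ u < v := by omega
    simp [pvOri, pvF, pvLive, huv, hnuv, Bool.and_comm]
  rw [e1, e2]
  simp

theorem pvDeg_match (tiles : List (Int × Int)) (removed : List Bool) (k : Nat)
    (hk : k < (pvK removed tiles.length).length) :
    pvAliveCnt (pvBuildA tiles) removed ((pvK removed tiles.length).getD k 0)
      = (pvDegArr ((pvK removed tiles.length).map (pvF tiles))).getD k 0 := by
  set K := pvK removed tiles.length with hKdef
  set v := K.getD k 0 with hvdef
  have hvK : v = K[k] := pvK_getD_getElem removed tiles.length k hk
  have hvmem : K[k] ∈ K := List.getElem_mem hk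
  have hvn : v < tiles.length := by rw [hvK]; exact (pvK_mem hvmem).1
  have hpw : K.Pairwise (· < ·) := pvK_pairwise removed tiles.length
  have hlen : (K.map (pvF tiles)).length = K.length := List.length_map ..
  rw [pvAliveCnt_ori tiles removed v hvn,
    pvDegArr_getD (K.map (pvF tiles)) k (by rw [hlen]; exact hk),
    pvCanon_length (K.map (pvF tiles)) k (by rw [hlen]; exact hk)]
  congr 1
  rw [hlen]
  have hgetD : ∀ l : Nat, l < K.length → (K.map (pvF tiles)).getD l (0, 0) = pvF tiles (K.getD l 0) := by
    intro l hl
    rw [List.getD_eq_getElem _ _ (by simpa using hl), List.getElem_map,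
      pvK_getD_getElem removed tiles.length l hl]
  have hlt_iff : ∀ l : Nat, l < K.length → (K.getD l 0 < v ↔ l < k) := by
    intro l hl
    rw [pvK_getD_getElem removed tiles.length l hl, hvK]
    exact pvSorted_lt_iff hpw hk hl
  have hlt_iff' : ∀ l : Nat, l < K.length → (v < K.getD l 0 ↔ k < l) := by
    intro l hl
    rw [pvK_getD_getElem removed tiles.length l hl, hvK]
    exact pvSorted_lt_iff hpw hl hk
  have hcongr : (List.range K.length).countP
        (fun l => if l < k then pvCond ((K.map (pvF tiles)).getD l (0, 0)) ((K.map (pvF tiles)).getD k (0, 0))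
                  else if k < l then pvCond ((K.map (pvF tiles)).getD k (0, 0)) ((K.map (pvF tiles)).getD l (0, 0))
                  else false)
      = (List.range K.length).countP (fun l => pvOri tiles v (K.getD l 0)) := by
    apply List.countP_congr
    intro l hlmem
    have hl : l < K.length := List.mem_range.mp hlmem
    have hbool : (if l < k then pvCond ((K.map (pvF tiles)).getD l (0, 0)) ((K.map (pvF tiles)).getD k (0, 0))
                  else if k < l then pvCond ((K.map (pvF tiles)).getD k (0, 0)) ((K.map (pvF tiles)).getD l (0, 0))
                  else false) = pvOri tiles v (K.getD l 0) := by
      rw [hgetD l hl, hgetD k hk, ← hvdef]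
      unfold pvOri
      rcases Nat.lt_trichotomy l k with h | h | h
      · rw [if_pos h, if_pos ((hlt_iff l hl).mpr h)]
      · subst h
        rw [← hvdef]
        simp
      · rw [if_neg (by omega), if_pos h,
          if_neg (by rw [hlt_iff l hl]; omega), if_pos ((hlt_iff' l hl).mpr h)]
    rw [hbool]
  rw [hcongr]
  have hmapK : (List.range K.length).countP (fun l => pvOri tiles v (K.getD l 0))
      = K.countP (pvOri tiles v) := by
    conv_rhs => rw [← pvMapGetD K 0]
    rw [List.countP_map]
    rfl
  rw [hmapK, hKdef, pvK_countP]

-- ---- selection equality ----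

theorem pvSelect_match (tiles : List (Int × Int)) (removed : List Bool) :
    (pvSelectA (pvBuildA tiles) removed tiles.length).1
        = (pvSelectB (pvDegArr ((pvK removed tiles.length).map (pvF tiles)))
            ((pvK removed tiles.length).map (pvF tiles)).length).1
      ∧ ((pvSelectA (pvBuildA tiles) removed tiles.length).1 ≠ 0 →
          ∃ k, k < (pvK removed tiles.length).length ∧
            (pvSelectB (pvDegArr ((pvK removed tiles.length).map (pvF tiles)))
              ((pvK removed tiles.length).map (pvF tiles)).length).2 = (k : Int) ∧
            (pvSelectA (pvBuildA tiles) removed tiles.length).2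
              = (((pvK removed tiles.length).getD k 0 : Nat) : Int)) := by
  set K := pvK removed tiles.length with hKdef
  set alive := K.map (pvF tiles) with halive
  have hsa : pvSelectA (pvBuildA tiles) removed tiles.length
      = (List.range K.length).foldl
          (fun b k => if pvAliveCnt (pvBuildA tiles) removed (K.getD k 0) > b.1
            then (pvAliveCnt (pvBuildA tiles) removed (K.getD k 0), ((K.getD k 0 : Nat) : Int)) else b)
          (0, -1) := by
    unfold pvSelectA
    rw [PySem.List.foldl_if_eq_foldl_filter (fun i => !(removed.getD i true))
      (fun b i => if pvAliveCnt (pvBuildA tiles) removed i > b.1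
        then (pvAliveCnt (pvBuildA tiles) removed i, (i : Int)) else b)]
    have : (List.range tiles.length).filter (fun i => !(removed.getD i true)) = K := by
      rw [hKdef]; rfl
    rw [this]
    conv_lhs => rw [← pvMapGetD K 0]
    rw [List.foldl_map]
  have hsb : pvSelectB (pvDegArr alive) alive.length
      = (List.range K.length).foldl
          (fun b k => if (pvDegArr alive).getD k 0 > b.1
            then ((pvDegArr alive).getD k 0, (k : Int)) else b) (0, -1) := by
    unfold pvSelectB
    rw [halive, List.length_map]
  rw [hsa, hsb]
  apply pvFoldl_rel
    (R := fun (a b : Int × Int) => a.1 = b.1 ∧ (a.1 ≠ 0 →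
      ∃ k, k < K.length ∧ b.2 = (k : Int) ∧ a.2 = ((K.getD k 0 : Nat) : Int)))
  · exact ⟨rfl, fun h => absurd rfl h⟩
  · intro b c x hx hR
    have hxK : x < K.length := List.mem_range.mp hx
    have hdeg : pvAliveCnt (pvBuildA tiles) removed (K.getD x 0)
        = (pvDegArr alive).getD x 0 := by
      rw [halive, hKdef]
      exact pvDeg_match tiles removed x (by rwa [← hKdef])
    rw [hdeg, ← hR.1]
    by_cases hgt : (pvDegArr alive).getD x 0 > b.1
    · rw [if_pos hgt, if_pos hgt]
      exact ⟨rfl, fun _ => ⟨x, hxK, rfl, rfl⟩⟩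
    · rw [if_neg hgt, if_neg hgt]
      exact hR

-- ---- the removal step: A's mask update corresponds to B's list deletion ----

theorem pvFilter_ne_eraseIdx :
    ∀ (K : List Nat) (k : Nat) (hk : k < K.length), K.Nodup →
      K.filter (fun u => !(u == K[k])) = K.eraseIdx k := by
  intro K
  induction K with
  | nil => intro k hk _; simp at hk
  | cons a t ih =>
    intro k hk hnd
    rw [List.nodup_cons] at hnd
    cases k with
    | zero =>
      simp only [List.getElem_cons_zero, List.eraseIdx_cons_zero, List.filter_cons]
      have : (!(a == a)) = false := by simp
      rw [this]
      simp only [Bool.false_eq_true, if_false]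
      apply List.filter_eq_self.mpr
      intro u hu
      have : u ≠ a := fun h => hnd.1 (h ▸ hu)
      simp [this]
    | succ k' =>
      have hk' : k' < t.length := by simpa using hk
      have htk : t[k'] ∈ t := List.getElem_mem hk'
      have hne : a ≠ t[k'] := fun h => hnd.1 (h ▸ htk)
      simp only [List.getElem_cons_succ, List.eraseIdx_cons_succ, List.filter_cons]
      rw [show (!(a == t[k'])) = true by simpa using hne]
      simp only [if_true]
      rw [ih k' hk' hnd.2]

theorem pvK_set (removed : List Bool) (n k : Nat) (hlen : removed.length = n)
    (hk : k < (pvK removed n).length) :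
    pvK (removed.set ((pvK removed n).getD k 0) true) n = (pvK removed n).eraseIdx k := by
  set K := pvK removed n with hKdef
  set v := K.getD k 0 with hvdef
  have hvK : v = K[k] := pvK_getD_getElem removed n k hk
  have hvmem : K[k] ∈ K := List.getElem_mem hk
  have hvn : v < n := by rw [hvK]; exact (pvK_mem hvmem).1
  have hstep : pvK (removed.set v true) n = (List.range n).filter (fun u => !(u == v) && pvLive removed u) := by
    unfold pvK
    apply List.filter_congr
    intro u hu
    have hun : u < n := List.mem_range.mp hu
    by_cases huv : u = v
    · subst huv
      have hvset : (removed.set v true)[v]? = some true := by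
        rw [List.getElem?_set]
        simp [show v < removed.length by omega]
      simp [pvLive, List.getD_eq_getElem?_getD, hvset]
    · have hvset : (removed.set v true)[u]? = removed[u]? := by
        rw [List.getElem?_set]
        simp [Ne.symm huv]
      simp [pvLive, List.getD_eq_getElem?_getD, hvset, huv]
  rw [hstep]
  have : (List.range n).filter (fun u => !(u == v) && pvLive removed u)
      = K.filter (fun u => !(u == v)) := by
    rw [hKdef]
    unfold pvK
    rw [List.filter_filter]
  rw [this, hvK]
  exact pvFilter_ne_eraseIdx K k hk (List.Nodup.filter _ (List.nodup_range))

-- ---- the main simulation ----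

theorem pvLoop_eq (tiles : List (Int × Int)) :
    ∀ (fuel : Nat) (removed : List Bool) (count : Int), removed.length = tiles.length →
      pvLoopA (pvBuildA tiles) tiles.length fuel removed count
        = pvGoB fuel ((pvK removed tiles.length).map (pvF tiles)) count := by
  intro fuel
  induction fuel with
  | zero => intro removed count _; rfl
  | succ fuel ih =>
    intro removed count hlen
    obtain ⟨h1, h2⟩ := pvSelect_match tiles removed
    simp only [pvLoopA, pvGoB]
    by_cases h0 : (pvSelectA (pvBuildA tiles) removed tiles.length).1 = 0
    · rw [if_pos h0, if_pos (by rw [← h1]; exact h0)]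
    · obtain ⟨k, hk, hb2, ha2⟩ := h2 h0
      rw [if_neg h0, if_neg (by rw [← h1]; exact h0)]
      rw [ha2, hb2]
      have htoa : (((((pvK removed tiles.length).getD k 0 : Nat)) : Int)).toNat
          = (pvK removed tiles.length).getD k 0 := by simp
      have htob : ((k : Int)).toNat = k := by simp
      rw [htoa, htob]
      rw [ih (removed.set ((pvK removed tiles.length).getD k 0) true) (count + 1)
        (by rw [List.length_set]; exact hlen)]
      rw [pvK_set removed tiles.length k hlen hk]
      rw [List.eraseIdx_map]

-- the initial states correspond: nothing removed ↔ all tiles alive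
theorem pvK_init (tiles : List (Int × Int)) :
    (pvK (List.replicate tiles.length false) tiles.length).map (pvF tiles) = tiles := by
  have hfull : pvK (List.replicate tiles.length false) tiles.length = List.range tiles.length := by
    unfold pvK
    apply List.filter_eq_self.mpr
    intro u hu
    have hun : u < tiles.length := List.mem_range.mp hu
    simp [pvLive, List.getD_eq_getElem?_getD, List.getElem?_replicate, hun]
  rw [hfull]
  exact pvMapGetD tiles (0, 0)

-- ===== VERDICT (by name: the statement is the Claim_ definition above) =====
theorem min_removals_for_line_py_spec : Claim_equal_min_removals_for_line_py := by
  intro tiles _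
  unfold Spec_min_removals_for_line_py min_removals_for_line_py min_removals_for_line_py_alt
  rw [pvLoop_eq tiles (tiles.length + 1) (List.replicate tiles.length false) 0 (by simp)]
  rw [pvK_init]
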